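-- pv_equiv track=rewrite | github.com/mailsanjayhere/NetYCE | cisco_extract.py | convert_to_rule_format
-- ===== SOURCE A (Python) =====
-- def convert_to_rule_format(text):
--     parts = text.split()
--     section_number = ''
--     cmd_desc = ''
--
--     for part in parts:
--         if '.' in part and part.replace('.', '').isdigit():
--             section_number = part.replace('.', '')
--         elif section_number and '(' not in part:
--             cmd_desc += part + ' '
--
--     cmd_desc = cmd_desc.strip()
--     cmd_desc = ''.join(e for e in cmd_desc if e.isalnum() or e.isspace()).lower()
--     cmd_desc = cmd_desc.replace(' ', '_')
--
--     rule_name = f"rule_{section_number}_{cmd_desc}"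
--     return rule_name
-- ===== SOURCE B (Python) =====
-- def convert_to_rule_format(text):
--     parts = text.split()
--
--     def is_section(tok):
--         return '.' in tok and tok.replace('.', '').isdigit()
--
--     def after_first_section(toks):
--         for i, t in enumerate(toks):
--             if is_section(t):
--                 return toks[i + 1:]
--         return []
--
--     sections = [t.replace('.', '') for t in parts if is_section(t)]
--     section_number = sections[-1] if sections else ''
--     desc_tokens = [t for t in after_first_section(parts)
--                    if not is_section(t) and '(' not in t]
--
--     cmd_desc = ' '.join(desc_tokens)
--     cmd_desc = ''.join(e for e in cmd_desc if e.isalnum() or e.isspace()).lower()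
--     cmd_desc = cmd_desc.replace(' ', '_')
--
--     return f"rule_{section_number}_{cmd_desc}"
-- ===== Notes on version B (the rewrite author's own statement) =====
-- stated objective: alternative
-- what changed: Replaces A's single stateful accumulation loop by a pure two-pass decomposition: one comprehension collects the section-number tokens (last one wins), a helper finds the tokens after the first section token, and a second comprehension filters the description tokens, joined with ' '.join instead of string concatenation plus strip.
import Mathlib
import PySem

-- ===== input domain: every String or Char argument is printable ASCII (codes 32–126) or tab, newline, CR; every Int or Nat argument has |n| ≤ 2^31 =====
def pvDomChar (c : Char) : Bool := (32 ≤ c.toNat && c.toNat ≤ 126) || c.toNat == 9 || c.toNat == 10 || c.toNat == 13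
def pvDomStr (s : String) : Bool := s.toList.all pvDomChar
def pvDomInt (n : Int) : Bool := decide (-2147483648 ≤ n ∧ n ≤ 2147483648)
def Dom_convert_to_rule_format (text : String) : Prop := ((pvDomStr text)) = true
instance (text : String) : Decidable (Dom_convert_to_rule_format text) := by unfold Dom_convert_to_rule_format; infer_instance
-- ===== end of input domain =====

-- B replaces A's one stateful loop by a pure two-pass decomposition (collect section tokens; filter the
-- tokens after the first section token) with ' '.join instead of concatenation + strip; same cost (objective: alternative).

-- shared helper: the section-number test "'.' in part and part.replace('.', '').isdigit()" (identical in both Pythons)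
def pvSecLike (t : List Char) : Bool :=
  PySem.Chars.isIn ['.'] t && PySem.Chars.strIsdigit (PySem.Chars.replace t ['.'] [])

-- shared helper: "part.replace('.', '')" (identical in both Pythons)
def pvNormTok (t : List Char) : List Char := PySem.Chars.replace t ['.'] []

-- ===== PORT A =====
-- A-side helper: the body of A's for-loop over (section_number, cmd_desc)
def pvStep (st : List Char × List Char) (part : List Char) : List Char × List Char :=
  if pvSecLike part then (pvNormTok part, st.2)
  else if !st.1.isEmpty && !PySem.Chars.isIn ['('] part then (st.1, st.2 ++ part ++ [' '])
  else st

def convert_to_rule_format (text : String) : String :=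
  let parts := PySem.Chars.split₀ text.toList
  let st := parts.foldl pvStep ([], [])
  let cmd1 := PySem.Chars.strip st.2
  let cmd2 := PySem.Chars.lower (cmd1.filter (fun e => PySem.Chars.isalnum e || PySem.Chars.isspace e))
  let cmd3 := PySem.Chars.replace cmd2 [' '] ['_']
  String.mk ("rule_".toList ++ st.1 ++ "_".toList ++ cmd3)

-- ===== PORT B =====
-- B-side helper: after_first_section (for-loop over enumerate returning toks[i+1:] at the first section token)
def pvAfterFirstSection : List (List Char) → List (List Char)
  | [] => []
  | t :: rest => if pvSecLike t then rest else pvAfterFirstSection rest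

-- B-side helper: the description-token test "not is_section(t) and '(' not in t"
def pvGood (t : List Char) : Bool := !pvSecLike t && !PySem.Chars.isIn ['('] t

def convert_to_rule_format_alt (text : String) : String :=
  let parts := PySem.Chars.split₀ text.toList
  let sections := (parts.filter pvSecLike).map pvNormTok
  let section_number := sections.getLast?.getD []
  let desc_tokens := (pvAfterFirstSection parts).filter pvGood
  let cmd := PySem.Chars.join [' '] desc_tokens
  let cmd2 := PySem.Chars.lower (cmd.filter (fun e => PySem.Chars.isalnum e || PySem.Chars.isspace e))
  let cmd3 := PySem.Chars.replace cmd2 [' '] ['_']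
  String.mk ("rule_".toList ++ section_number ++ "_".toList ++ cmd3)

-- ===== PRECONDITION & SPEC =====
def Spec_convert_to_rule_format (text : String) (out : String) : Prop := out = convert_to_rule_format_alt text
instance (text : String) (out : String) : Decidable (Spec_convert_to_rule_format text out) := by unfold Spec_convert_to_rule_format; infer_instance

-- ===== CLAIM (what is proved, stated in full; the proofs are below) =====
def Claim_equal_convert_to_rule_format : Prop := ∀ (text : String), Dom_convert_to_rule_format text → Spec_convert_to_rule_format text (convert_to_rule_format text)

-- ===== LEMMAS AND PROOFS =====

-- a token passing the section test normalizes to a nonempty string (isdigit is false on '')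
theorem pvNormTok_ne_nil {t : List Char} (h : pvSecLike t = true) : pvNormTok t ≠ [] := by
  simp [pvSecLike, PySem.Chars.strIsdigit, pvNormTok] at h ⊢
  exact h.2.1

theorem pvGetD_getLast?_cons {α : Type} (a s : α) (xs : List α) :
    ((a :: xs).getLast?).getD s = (xs.getLast?).getD a := by
  induction xs with
  | nil => rfl
  | cons b l ih =>
    rw [List.getLast?_cons_cons]
    cases h : (b :: l).getLast? with
    | none => simp at h
    | some x => simp

-- the fold once the section number is set
theorem pvFold1 (l : List (List Char)) : ∀ (s d : List Char), s ≠ [] →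
    l.foldl pvStep (s, d) =
      (((l.filter pvSecLike).map pvNormTok).getLast?.getD s,
       d ++ (l.filter pvGood).flatMap (· ++ [' '])) := by
  induction l with
  | nil => intro s d _; simp
  | cons t l ih =>
    intro s d hs
    by_cases hsec : pvSecLike t = true
    · have hstep : pvStep (s, d) t = (pvNormTok t, d) := by simp [pvStep, hsec]
      rw [List.foldl_cons, hstep, ih _ _ (pvNormTok_ne_nil hsec)]
      have hg : pvGood t = false := by simp [pvGood, hsec]
      simp [hsec, hg, pvGetD_getLast?_cons]
    · have hsec' : pvSecLike t = false := by simpa using hsec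
      by_cases hpar : PySem.Chars.isIn ['('] t = true
      · have hstep : pvStep (s, d) t = (s, d) := by simp [pvStep, hsec', hpar]
        rw [List.foldl_cons, hstep, ih _ _ hs]
        have hg : pvGood t = false := by simp [pvGood, hpar]
        simp [hsec', hg]
      · have hpar' : PySem.Chars.isIn ['('] t = false := by simpa using hpar
        have hse : s.isEmpty = false := by simpa [List.isEmpty_iff] using hs
        have hstep : pvStep (s, d) t = (s, d ++ t ++ [' ']) := by
          simp [pvStep, hsec', hpar', hse]
        rw [List.foldl_cons, hstep, ih _ _ hs]
        have hg : pvGood t = true := by simp [pvGood, hsec', hpar']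
        simp [hsec', hg]

-- the full fold from the initial state
theorem pvFold0 (l : List (List Char)) :
    l.foldl pvStep ([], []) =
      (((l.filter pvSecLike).map pvNormTok).getLast?.getD [],
       ((pvAfterFirstSection l).filter pvGood).flatMap (· ++ [' '])) := by
  induction l with
  | nil => simp [pvAfterFirstSection]
  | cons t l ih =>
    by_cases hsec : pvSecLike t = true
    · have hstep : pvStep ([], []) t = (pvNormTok t, []) := by simp [pvStep, hsec]
      rw [List.foldl_cons, hstep, pvFold1 l _ _ (pvNormTok_ne_nil hsec)]
      simp [hsec, pvAfterFirstSection, pvGetD_getLast?_cons]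
    · have hsec' : pvSecLike t = false := by simpa using hsec
      have hstep : pvStep ([], []) t = ([], []) := by simp [pvStep, hsec']
      rw [List.foldl_cons, hstep, ih]
      simp [hsec', pvAfterFirstSection]

-- every token the whitespace split produces is nonempty and free of whitespace characters
theorem pvSplit₀_go_tokens (s : List Char) : ∀ (cur : List Char) (acc : List (List Char)),
    (∀ c ∈ cur, PySem.Chars.isspace c = false) →
    (∀ t ∈ acc, t ≠ [] ∧ ∀ c ∈ t, PySem.Chars.isspace c = false) →
    ∀ t ∈ PySem.Chars.split₀.go s cur acc, t ≠ [] ∧ ∀ c ∈ t, PySem.Chars.isspace c = false := by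
  induction s with
  | nil =>
    intro cur acc hcur hacc t ht
    by_cases hc : cur.isEmpty = true
    · simp [PySem.Chars.split₀.go, hc] at ht
      exact hacc t ht
    · simp [PySem.Chars.split₀.go, hc] at ht
      rcases ht with ht | rfl
      · exact hacc t ht
      · refine ⟨by simpa [List.isEmpty_iff] using hc, ?_⟩
        intro c hc'; exact hcur c (List.mem_reverse.mp hc')
  | cons c rest ih =>
    intro cur acc hcur hacc t ht
    by_cases hsp : PySem.Chars.isspace c = true
    · by_cases hc : cur.isEmpty = true
      · simp only [PySem.Chars.split₀.go, hsp, hc, if_true] at ht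
        exact ih [] acc (by simp) hacc t ht
      · simp only [PySem.Chars.split₀.go, hsp, hc, if_true] at ht
        rw [if_neg (by simpa using hc)] at ht
        refine ih [] (cur.reverse :: acc) (by simp) ?_ t ht
        intro u hu
        rcases List.mem_cons.mp hu with rfl | hu
        · exact ⟨by simpa [List.isEmpty_iff] using hc,
            fun x hx => hcur x (List.mem_reverse.mp hx)⟩
        · exact hacc u hu
    · have hsp' : PySem.Chars.isspace c = false := by simpa using hsp
      simp only [PySem.Chars.split₀.go, hsp', Bool.false_eq_true, if_false] at ht
      refine ih (c :: cur) acc ?_ hacc t ht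
      intro x hx
      rcases List.mem_cons.mp hx with rfl | hx
      · exact hsp'
      · exact hcur x hx

theorem pvSplit₀_tokens (s : List Char) :
    ∀ t ∈ PySem.Chars.split₀ s, t ≠ [] ∧ ∀ c ∈ t, PySem.Chars.isspace c = false := by
  exact pvSplit₀_go_tokens s [] [] (by simp) (by simp)

theorem pvMem_afterFirstSection {l : List (List Char)} {t : List Char}
    (h : t ∈ pvAfterFirstSection l) : t ∈ l := by
  induction l with
  | nil => simp [pvAfterFirstSection] at h
  | cons u l ih =>
    by_cases hu : pvSecLike u = true
    · simp [pvAfterFirstSection, hu] at h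
      exact List.mem_cons_of_mem _ h
    · simp [pvAfterFirstSection, hu] at h
      exact List.mem_cons_of_mem _ (ih h)

-- flatMap with a trailing space = join with ' ' plus one trailing space
theorem pvFlat_eq_join (ts : List (List Char)) (h : ts ≠ []) :
    ts.flatMap (· ++ [' ']) = PySem.Chars.join [' '] ts ++ [' '] := by
  induction ts with
  | nil => simp at h
  | cons t ts ih =>
    cases ts with
    | nil => simp [PySem.Chars.join, List.intercalate]
    | cons u ts' =>
      rw [List.flatMap_cons, ih (by simp), PySem.Chars.join_cons_cons]
      simp

-- the reverse of a join of nonempty whitespace-free tokens starts with a non-whitespace char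
theorem pvJoin_reverse (ts : List (List Char)) (hne : ts ≠ [])
    (h : ∀ t ∈ ts, t ≠ [] ∧ ∀ c ∈ t, PySem.Chars.isspace c = false) :
    ∃ c cs, (PySem.Chars.join [' '] ts).reverse = c :: cs ∧ PySem.Chars.isspace c = false := by
  induction ts with
  | nil => simp at hne
  | cons t ts ih =>
    cases ts with
    | nil =>
      obtain ⟨ht, hsp⟩ := h t (by simp)
      cases hr : t.reverse with
      | nil => simp at hr; exact absurd hr ht
      | cons c cs =>
        have hct : c ∈ t := by
          have : c ∈ t.reverse := by rw [hr]; simp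
          exact List.mem_reverse.mp this
        refine ⟨c, cs, ?_, hsp c hct⟩
        rw [PySem.Chars.join_singleton]
        exact hr
    | cons u ts' =>
      obtain ⟨c, cs, hrev, hc⟩ := ih (by simp) (fun x hx => h x (List.mem_cons_of_mem _ hx))
      refine ⟨c, cs ++ (List.reverse [' '] ++ t.reverse), ?_, hc⟩
      rw [PySem.Chars.join_cons_cons]
      simp [hrev]

-- strip of A's concatenation = B's join, for nonempty whitespace-free tokens
theorem pvStrip_flat (ts : List (List Char))
    (h : ∀ t ∈ ts, t ≠ [] ∧ ∀ c ∈ t, PySem.Chars.isspace c = false) :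
    PySem.Chars.strip (ts.flatMap (· ++ [' '])) = PySem.Chars.join [' '] ts := by
  cases hts : ts with
  | nil => simp [PySem.Chars.strip, PySem.Chars.lstrip, PySem.Chars.rstrip, PySem.Chars.join,
      List.intercalate]
  | cons t ts' =>
    subst hts
    rw [pvFlat_eq_join _ (by simp)]
    obtain ⟨c, cs, hrev, hc⟩ := pvJoin_reverse (t :: ts') (by simp) h
    obtain ⟨ht, hspt⟩ := h t (by simp)
    cases t with
    | nil => exact absurd rfl ht
    | cons a t0 =>
      have ha : PySem.Chars.isspace a = false := hspt a (by simp)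
      have hjoin_head : ∃ rest, PySem.Chars.join [' '] ((a :: t0) :: ts') ++ [' '] = a :: rest := by
        cases ts' with
        | nil => exact ⟨t0 ++ [' '], by simp [PySem.Chars.join_singleton]⟩
        | cons u ts'' =>
          rw [PySem.Chars.join_cons_cons]
          exact ⟨t0 ++ [' '] ++ PySem.Chars.join [' '] (u :: ts'') ++ [' '], by simp⟩
      obtain ⟨rest, hrest⟩ := hjoin_head
      rw [PySem.Chars.strip, PySem.Chars.lstrip, hrest, List.dropWhile_cons_of_neg (by simp [ha]),
        ← hrest, PySem.Chars.rstrip]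
      rw [List.reverse_append, List.reverse_singleton, List.singleton_append,
        List.dropWhile_cons_of_pos (by simp [PySem.Chars.isspace]),
        hrev, List.dropWhile_cons_of_neg (by simp [hc]), ← hrev, List.reverse_reverse]

-- ===== VERDICT (by name: the statement is the Claim_ definition above) =====
theorem convert_to_rule_format_spec : Claim_equal_convert_to_rule_format := by
  intro text _
  unfold Spec_convert_to_rule_format convert_to_rule_format convert_to_rule_format_alt
  have hgood : ∀ t ∈ (pvAfterFirstSection (PySem.Chars.split₀ text.toList)).filter pvGood,
      t ≠ [] ∧ ∀ c ∈ t, PySem.Chars.isspace c = false := by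
    intro t ht
    exact pvSplit₀_tokens text.toList t (pvMem_afterFirstSection (List.mem_of_mem_filter ht))
  simp only [pvFold0, pvStrip_flat _ hgood]
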